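-- pv_equiv track=rewrite | github.com/allyotov/find-your-okved | src/services/okved.py | _parse_raw_phone
-- ===== SOURCE A (Python) =====
-- from typing import Tuple
--
-- def _parse_raw_phone(raw_phone: str) -> Tuple[bool, str]:
--     digits = []
--     plus_before_first_digit = False
--     first_digit_found = False
--
--     for char in raw_phone:
--         if char == '+' and not first_digit_found:
--             plus_before_first_digit = True
--         elif char.isdigit():
--             if not first_digit_found and char == '0':
--                 continue
--             digits.append(char)
--             first_digit_found = True
--
--     return plus_before_first_digit, ''.join(digits)
-- ===== SOURCE B (Python) =====
-- from typing import Tuple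
--
-- def _parse_raw_phone(raw_phone: str) -> Tuple[bool, str]:
--     digits = ''.join(c for c in raw_phone if c.isdigit()).lstrip('0')
--     idx = next((i for i, c in enumerate(raw_phone) if c.isdigit() and c != '0'),
--                len(raw_phone))
--     plus = '+' in raw_phone[:idx]
--     return plus, digits
-- ===== Notes on version B (the rewrite author's own statement) =====
-- stated objective: simpler
-- what changed: Replaces A's single stateful scan with three mutable variables by a direct decomposition: digits = the digit characters with leading zeros stripped, and the flag = presence of a plus sign in the prefix before the first nonzero digit.
import Mathlib
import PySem

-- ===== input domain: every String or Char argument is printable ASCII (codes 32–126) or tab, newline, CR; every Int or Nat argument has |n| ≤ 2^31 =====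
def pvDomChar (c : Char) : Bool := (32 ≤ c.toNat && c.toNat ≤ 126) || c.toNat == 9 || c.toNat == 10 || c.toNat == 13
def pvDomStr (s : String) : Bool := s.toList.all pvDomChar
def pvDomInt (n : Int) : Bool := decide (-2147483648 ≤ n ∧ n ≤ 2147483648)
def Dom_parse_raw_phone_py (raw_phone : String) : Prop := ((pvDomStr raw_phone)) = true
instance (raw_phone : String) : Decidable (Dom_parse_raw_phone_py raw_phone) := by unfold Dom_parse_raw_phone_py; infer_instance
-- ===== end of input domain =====

-- B replaces A's single stateful three-variable scan by a simpler decomposition: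
-- digits = filtered digit characters with leading zeros stripped; flag = presence of
-- a plus sign in the prefix before the first nonzero digit (objective: simpler; same cost).

-- ===== PORT A =====
-- one loop step of A: state = (digits, plus_before_first_digit, first_digit_found)
def pvAStep (st : List Char × Bool × Bool) (char : Char) : List Char × Bool × Bool :=
  if char == '+' && !st.2.2 then (st.1, true, st.2.2)
  else if PySem.Chars.isdigit char then
    if !st.2.2 && char == '0' then st
    else (st.1 ++ [char], st.2.1, true)
  else st

def parse_raw_phone_py (raw_phone : String) : Bool × String :=
  let st := raw_phone.toList.foldl pvAStep ([], false, false)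
  (st.2.1, String.mk st.1)

-- ===== PORT B =====
def parse_raw_phone_py_alt (raw_phone : String) : Bool × String :=
  let cs := raw_phone.toList
  -- ''.join(c for c in raw_phone if c.isdigit()).lstrip('0')  (lstrip('0') = dropWhile of '0's, exact)
  let digits := (cs.filter (fun c => PySem.Chars.isdigit c)).dropWhile (fun c => c == '0')
  -- next((i for i,c in enumerate(raw_phone) if c.isdigit() and c != '0'), len(raw_phone))
  let idx := (cs.findIdx? (fun c => PySem.Chars.isdigit c && c != '0')).getD cs.length
  -- '+' in raw_phone[:idx]  (idx is a nonnegative in-range bound, so the slice is take idx)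
  let plus := (cs.take idx).contains '+'
  (plus, String.mk digits)

-- ===== PRECONDITION & SPEC =====
def Spec_parse_raw_phone_py (raw_phone : String) (out : Bool × String) : Prop := out = parse_raw_phone_py_alt raw_phone
instance (raw_phone : String) (out : Bool × String) : Decidable (Spec_parse_raw_phone_py raw_phone out) := by unfold Spec_parse_raw_phone_py; infer_instance

-- ===== CLAIM (what is proved, stated in full; the proofs are below) =====
def Claim_equal_parse_raw_phone_py : Prop := ∀ (raw_phone : String), Dom_parse_raw_phone_py raw_phone → Spec_parse_raw_phone_py raw_phone (parse_raw_phone_py raw_phone)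

-- ===== LEMMAS AND PROOFS =====

-- take up to the first index satisfying p = takeWhile of ¬p
theorem pv_take_findIdx (p : Char → Bool) :
    ∀ (cs : List Char), cs.take ((cs.findIdx? p).getD cs.length) = cs.takeWhile (fun c => !p c) := by
  intro cs
  induction cs with
  | nil => rfl
  | cons c cs ih =>
    by_cases h : p c
    · simp [List.findIdx?_cons, h]
    · simp [List.findIdx?_cons, h]
      cases hfi : cs.findIdx? p with
      | none => simpa [hfi] using ih
      | some n => simpa [hfi] using ih

-- once a nonzero digit has been found, A just appends every further digit; the flag is frozen
theorem pv_fold_found (digits : List Char) (plus : Bool) :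
    ∀ (cs : List Char), cs.foldl pvAStep (digits, plus, true)
      = (digits ++ cs.filter (fun c => PySem.Chars.isdigit c), plus, true) := by
  intro cs
  induction cs generalizing digits with
  | nil => simp
  | cons c cs ih =>
    by_cases h : PySem.Chars.isdigit c
    · simp [pvAStep, h, ih]
    · simp [pvAStep, h, ih]

-- the main invariant: A's fold from the not-yet-found state computes B's three quantities
theorem pv_fold_main :
    ∀ (cs : List Char) (plus : Bool), cs.foldl pvAStep (([] : List Char), plus, false)
      = ((cs.filter (fun c => PySem.Chars.isdigit c)).dropWhile (fun c => c == '0'),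
         plus || (cs.takeWhile (fun c => !(PySem.Chars.isdigit c && c != '0'))).contains '+',
         cs.any (fun c => PySem.Chars.isdigit c && c != '0')) := by
  intro cs
  induction cs with
  | nil => intro plus; simp
  | cons c cs ih =>
    intro plus
    by_cases hd : PySem.Chars.isdigit c
    · by_cases h0 : c = '0'
      · subst h0
        have hstep : ∀ p : Bool, pvAStep ([], p, false) '0' = ([], p, false) := by decide
        rw [List.foldl_cons, hstep, ih plus]
        have h1 : PySem.Chars.isdigit '0' = true := by decide
        simp [h1]
      · have hc0 : (c == '0') = false := by simp [h0]
        have hplus : (c == '+') = false := by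
          simp only [beq_eq_false_iff_ne, ne_eq]; rintro rfl; exact absurd hd (by decide)
        have hstep : pvAStep ([], plus, false) c = ([c], plus, true) := by
          simp [pvAStep, hplus, hd, hc0]
        rw [List.foldl_cons, hstep, pv_fold_found]
        simp [hd, hc0, h0]
    · by_cases hp : c = '+'
      · subst hp
        have hstep : ∀ p : Bool, pvAStep ([], p, false) '+' = ([], true, false) := by decide
        rw [List.foldl_cons, hstep, ih true]
        have h1 : PySem.Chars.isdigit '+' = false := by decide
        simp [h1]
      · have hp' : (c == '+') = false := by simp [hp]
        have hd' : PySem.Chars.isdigit c = false := by simpa using hd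
        have hstep : pvAStep ([], plus, false) c = ([], plus, false) := by
          simp [pvAStep, hp', hd']
        rw [List.foldl_cons, hstep, ih plus]
        have hpc : ¬ '+' = c := fun h => hp h.symm
        simp [hd', hpc]

-- ===== VERDICT (by name: the statement is the Claim_ definition above) =====
theorem parse_raw_phone_py_spec : Claim_equal_parse_raw_phone_py := by
  intro raw_phone _
  unfold Spec_parse_raw_phone_py
  simp only [parse_raw_phone_py, parse_raw_phone_py_alt]
  rw [pv_take_findIdx, pv_fold_main raw_phone.toList false]
  simp
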